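-- pv_equiv track=rewrite | github.com/kcharris/AdventOfCode2024 | Day7/answer1.py | helper
-- ===== SOURCE A (Python) =====
-- def helper(i, total, target, nums):
--     if i == len(nums):
--         if total == target:
--             return True
--         else:
--             return False
--     res = False
--     res |= helper(i+1, total + nums[i], target, nums)
--     res |= helper(i+1, total * nums[i], target, nums)
--     return res
-- ===== SOURCE B (Python) =====
-- def helper(i, total, target, nums):
--     reach = {total}
--     for j in range(i, len(nums)):
--         x = nums[j]
--         nxt = set()
--         for t in reach:
--             nxt.add(t + x)
--             nxt.add(t * x)
--         reach = nxt
--     return target in reach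
-- ===== Notes on version B (the rewrite author's own statement) =====
-- stated objective: alternative
-- what changed: Replaces the binary recursion over operator choices with an iterative forward pass that propagates the set of all reachable totals and tests membership of target at the end.
import Mathlib
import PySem

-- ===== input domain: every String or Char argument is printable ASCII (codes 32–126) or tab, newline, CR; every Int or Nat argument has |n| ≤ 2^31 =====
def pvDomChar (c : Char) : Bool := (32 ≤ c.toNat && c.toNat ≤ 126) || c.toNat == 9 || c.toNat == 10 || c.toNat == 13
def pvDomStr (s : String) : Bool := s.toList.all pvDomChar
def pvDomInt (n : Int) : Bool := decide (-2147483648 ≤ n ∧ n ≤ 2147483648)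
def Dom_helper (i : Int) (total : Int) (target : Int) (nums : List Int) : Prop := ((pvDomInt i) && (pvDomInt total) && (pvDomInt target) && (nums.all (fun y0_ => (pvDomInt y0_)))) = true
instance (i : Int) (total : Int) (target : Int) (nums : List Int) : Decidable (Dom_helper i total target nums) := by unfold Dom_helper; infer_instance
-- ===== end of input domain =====

-- B replaces A's binary recursion over operator choices by one iterative pass propagating the set of reachable totals (alternative decomposition, same cost).

-- ===== PORT A =====
def helper (i : Int) (total : Int) (target : Int) (nums : List Int) : Bool :=
  if i = (nums.length : Int) then
    (if total = target then true else false)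
  else
    match h : PySem.List.pyGet? nums i with
    | none => false            -- Python raises IndexError here; excluded by Pre_helper
    | some x =>
      (helper (i + 1) (total + x) target nums) || (helper (i + 1) (total * x) target nums)
termination_by ((nums.length : Int) - i).toNat
decreasing_by
  all_goals
    have hr : PySem.Raise.InRange nums.length i := by
      by_contra hc
      rw [← PySem.List.pyGet?_eq_none_iff (xs := nums) (i := i)] at hc
      simp [h] at hc
    unfold PySem.Raise.InRange at hr
    omega

-- ===== PORT B =====
def stepReach (x : Int) (reach : PySem.Set Int) : PySem.Set Int :=
  reach.foldl (fun nxt t => PySem.Set.add (PySem.Set.add nxt (t + x)) (t * x)) PySem.Set.empty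

def helper_alt (i : Int) (total : Int) (target : Int) (nums : List Int) : Bool :=
  let reach :=
    (PySem.List.pyRange i (nums.length : Int) 1).foldl
      (fun reach j => stepReach ((PySem.List.pyGet? nums j).getD 0) reach)
      (PySem.Set.ofList [total])
  PySem.Set.contains reach target

-- ===== PRECONDITION & SPEC =====
-- Pre_: exactly the inputs where A returns; outside (i > len or i < -len) A raises IndexError at nums[i].
def Pre_helper (i : Int) (total : Int) (target : Int) (nums : List Int) : Prop :=
  -(nums.length : Int) ≤ i ∧ i ≤ (nums.length : Int)
instance (i : Int) (total : Int) (target : Int) (nums : List Int) : Decidable (Pre_helper i total target nums) := by unfold Pre_helper; infer_instance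
def pvWitness_helper : Int × Int × Int × List Int := (0, 0, 9, [2, 3, 3])

def Spec_helper (i : Int) (total : Int) (target : Int) (nums : List Int) (out : Bool) : Prop := out = helper_alt i total target nums
instance (i : Int) (total : Int) (target : Int) (nums : List Int) (out : Bool) : Decidable (Spec_helper i total target nums out) := by unfold Spec_helper; infer_instance

-- ===== CLAIM (what is proved, stated in full; the proofs are below) =====
def Claim_equal_helper : Prop := ∀ (i : Int) (total : Int) (target : Int) (nums : List Int), Dom_helper i total target nums → Pre_helper i total target nums → Spec_helper i total target nums (helper i total target nums)

-- ===== LEMMAS AND PROOFS =====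

lemma mem_stepReach_aux (x u : Int) (s acc : List Int) :
    u ∈ s.foldl (fun nxt t => PySem.Set.add (PySem.Set.add nxt (t + x)) (t * x)) acc ↔
      u ∈ acc ∨ ∃ t ∈ s, u = t + x ∨ u = t * x := by
  induction s generalizing acc with
  | nil => simp
  | cons a s ih =>
    simp only [List.foldl_cons, ih, PySem.Set.mem_add, List.mem_cons]
    constructor
    · rintro (((h | h) | h) | ⟨t, ht, h⟩)
      · exact Or.inl h
      · exact Or.inr ⟨a, Or.inl rfl, Or.inl h⟩
      · exact Or.inr ⟨a, Or.inl rfl, Or.inr h⟩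
      · exact Or.inr ⟨t, Or.inr ht, h⟩
    · rintro (h | ⟨t, (rfl | ht), h⟩)
      · exact Or.inl (Or.inl (Or.inl h))
      · rcases h with h | h
        · exact Or.inl (Or.inl (Or.inr h))
        · exact Or.inl (Or.inr h)
      · exact Or.inr ⟨t, ht, h⟩

lemma mem_stepReach (x u : Int) (s : PySem.Set Int) :
    u ∈ stepReach x s ↔ ∃ t ∈ s, u = t + x ∨ u = t * x := by
  unfold stepReach
  rw [mem_stepReach_aux]
  simp [PySem.Set.empty]

lemma helper_step {i : Int} {nums : List Int} (hne : i ≠ (nums.length : Int)) {x : Int}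
    (hx : PySem.List.pyGet? nums i = some x) (total target : Int) :
    helper i total target nums =
      ((helper (i + 1) (total + x) target nums) || (helper (i + 1) (total * x) target nums)) := by
  conv_lhs => unfold helper
  rw [if_neg hne]
  split
  · rename_i heq; rw [hx] at heq; cases heq
  · rename_i x' heq; rw [hx] at heq; cases heq; rfl

lemma loop_mem (target : Int) (nums : List Int) :
    ∀ (n : Nat) (i : Int) (reach : List Int),
      -(nums.length : Int) ≤ i → i ≤ (nums.length : Int) →
      ((nums.length : Int) - i).toNat = n →
      ((target ∈ (PySem.List.pyRange i (nums.length : Int) 1).foldl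
          (fun reach j => stepReach ((PySem.List.pyGet? nums j).getD 0) reach) reach) ↔
        ∃ t ∈ reach, helper i t target nums = true) := by
  intro n
  induction n with
  | zero =>
    intro i reach h1 h2 h3
    have hi : i = (nums.length : Int) := by omega
    subst hi
    rw [PySem.List.pyRange_one_eq_nil le_rfl]
    simp only [List.foldl_nil]
    constructor
    · intro h
      exact ⟨target, h, by unfold helper; simp⟩
    · rintro ⟨t, ht, h⟩
      unfold helper at h
      simp at h
      exact h ▸ ht
  | succ n ih =>
    intro i reach h1 h2 h3
    have hlt : i < (nums.length : Int) := by omega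
    obtain ⟨x, hx⟩ : ∃ x, PySem.List.pyGet? nums i = some x := by
      cases hg : PySem.List.pyGet? nums i with
      | none =>
        rw [PySem.List.pyGet?_eq_none_iff] at hg
        exact absurd (by unfold PySem.Raise.InRange; omega) hg
      | some x => exact ⟨x, rfl⟩
    rw [PySem.List.pyRange_one_cons hlt]
    simp only [List.foldl_cons, hx, Option.getD_some]
    rw [ih (i + 1) (stepReach x reach) (by omega) (by omega) (by omega)]
    have hstep : ∀ u, u ∈ stepReach x reach ↔ ∃ t ∈ reach, u = t + x ∨ u = t * x :=
      fun u => mem_stepReach x u reach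
    have hne : i ≠ (nums.length : Int) := by omega
    constructor
    · rintro ⟨u, hu, hh⟩
      rcases (hstep u).1 hu with ⟨t, ht, rfl | rfl⟩
      · exact ⟨t, ht, by rw [helper_step hne hx]; simp [hh]⟩
      · exact ⟨t, ht, by rw [helper_step hne hx]; simp [hh]⟩
    · rintro ⟨t, ht, hh⟩
      rw [helper_step hne hx] at hh
      rcases Bool.or_eq_true_iff.1 hh with hh | hh
      · exact ⟨t + x, (hstep _).2 ⟨t, ht, Or.inl rfl⟩, hh⟩
      · exact ⟨t * x, (hstep _).2 ⟨t, ht, Or.inr rfl⟩, hh⟩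

-- ===== VERDICT (by name: the statement is the Claim_ definition above) =====
theorem helper_spec : Claim_equal_helper := by
  intro i total target nums _ hpre
  unfold Spec_helper helper_alt
  have hset : (PySem.Set.ofList [total] : List Int) = [total] := by
    apply PySem.Set.ofList_eq_self_of_nodup; simp
  have h := loop_mem target nums (((nums.length : Int) - i).toNat) i
    [total] hpre.1 hpre.2 rfl
  simp only [List.mem_singleton, exists_eq_left] at h
  simp only [hset]
  rw [Bool.eq_iff_iff, ← h, PySem.Set.contains_iff]
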